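-- pv_equiv track=rewrite | github.com/mohammadfaiizan/ProjectI | DSA/Theory/Dynamic_Programming/004_dp_knapsack_unbounded.py | coin_change_count_ways_permutations
-- ===== SOURCE A (Python) =====
-- from typing import List, Dict, Tuple, Optional
--
-- def coin_change_count_ways_permutations(coins: List[int], amount: int) -> int:
--     """
--     Count number of ways including different orders (permutations)
--
--     Args:
--         coins: Available coin denominations
--         amount: Target amount to make
--
--     Returns:
--         Number of ways including permutations
--     """
--     dp = [0] * (amount + 1)
--     dp[0] = 1
--
--     # Iterate amount first to count permutations
--     for i in range(1, amount + 1):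
--         for coin in coins:
--             if coin <= i:
--                 dp[i] += dp[i - coin]
--
--     return dp[amount]
-- ===== SOURCE B (Python) =====
-- def coin_change_count_ways_permutations(coins, amount):
--     """Count ordered ways (permutations) to make amount from coins.
--
--     Top-down memoized recursion over the remaining amount, instead of A's
--     bottom-up table fill: ways(i) = 1 if i == 0 else sum of ways(i - c).
--     """
--     memo = {}
--
--     def ways(i):
--         if i == 0:
--             return 1
--         if i in memo:
--             return memo[i]
--         total = 0
--         for c in coins:
--             if c <= i:
--                 total += ways(i - c)
--         memo[i] = total
--         return total
--
--     return ways(amount)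
-- ===== Notes on version B (the rewrite author's own statement) =====
-- stated objective: alternative
-- what changed: B replaces A's bottom-up iterative DP table fill by top-down memoized recursion on the remaining amount (ways(i) = 1 if i==0 else sum of ways(i-c), cached in a dict); Pre_ excludes negative amounts (A raises IndexError), and nonpositive coins with amount>=1 (negative coins make A raise IndexError; a zero coin makes A's in-place dp[i]+=dp[i] double an order-dependent partial sum, where B's natural recursion does not terminate).
-- outside the precondition, e.g. on coin_change_count_ways_permutations([1, 0], 1): A returns 2, B raises RecursionError
import Mathlib
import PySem

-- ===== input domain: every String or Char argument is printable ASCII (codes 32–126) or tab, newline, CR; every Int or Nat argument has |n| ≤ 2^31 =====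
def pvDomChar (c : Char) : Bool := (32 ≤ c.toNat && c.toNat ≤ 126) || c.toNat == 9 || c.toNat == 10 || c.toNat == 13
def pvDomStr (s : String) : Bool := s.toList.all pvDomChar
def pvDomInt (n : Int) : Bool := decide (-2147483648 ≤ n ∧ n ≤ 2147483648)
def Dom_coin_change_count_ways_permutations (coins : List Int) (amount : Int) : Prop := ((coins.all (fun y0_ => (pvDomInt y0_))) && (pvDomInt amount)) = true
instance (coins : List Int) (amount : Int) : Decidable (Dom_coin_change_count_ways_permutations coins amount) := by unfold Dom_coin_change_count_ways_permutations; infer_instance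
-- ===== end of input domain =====

-- B replaces A's bottom-up iterative DP table fill by top-down memoized recursion
-- on the remaining amount (ways(i) = 1 if i = 0, else the sum of ways(i - c) over
-- coins c ≤ i, cached in a dict); a different decomposition of the same count.

-- ===== PORT A =====
def coin_change_count_ways_permutations (coins : List Int) (amount : Int) : Int :=
  -- dp = [0]*(amount+1); dp[0] = 1
  let dp0 := PySem.List.pySetD (List.replicate (amount + 1).toNat (0 : Int)) 0 1
  -- for i in range(1, amount+1): for coin in coins: if coin <= i: dp[i] += dp[i-coin]
  let dp := (PySem.List.pyRange 1 (amount + 1) 1).foldl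
    (fun dp i => coins.foldl
      (fun dp coin =>
        if coin ≤ i then
          PySem.List.pySetD dp i (PySem.List.pyGetD dp i 0 + PySem.List.pyGetD dp (i - coin) 0)
        else dp) dp) dp0
  PySem.List.pyGetD dp amount 0

-- ===== PORT B =====
-- ways(i) from Source B, with the memo dict threaded through; the Nat fuel only makes the
-- recursion structural (it is never exhausted on inputs satisfying Pre_, where every
-- recursive call strictly decreases a nonnegative i).
def ccWays (coins : List Int) (fuel : Nat) (i : Int) (memo : PySem.Dict Int Int) :
    Int × PySem.Dict Int Int :=
  match fuel with
  | 0 => (0, memo)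
  | f + 1 =>
    -- if i == 0: return 1
    if i = 0 then (1, memo)
    else
      -- if i in memo: return memo[i]
      match memo.get? i with
      | some v => (v, memo)
      | none =>
        -- total = 0; for c in coins: if c <= i: total += ways(i - c)
        let p := coins.foldl
          (fun p c =>
            if c ≤ i then
              let q := ccWays coins f (i - c) p.2
              (p.1 + q.1, q.2)
            else p) ((0 : Int), memo)
        -- memo[i] = total; return total
        (p.1, p.2.insert i p.1)

def coin_change_count_ways_permutations_alt (coins : List Int) (amount : Int) : Int :=
  (ccWays coins (amount.natAbs + 1) amount PySem.Dict.empty).1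

-- ===== PRECONDITION & SPEC =====
-- Pre_ excludes: amount < 0 (A raises IndexError on dp[0] = 1), and coins with a
-- nonpositive coin when amount ≥ 1 — negative coins make A raise IndexError, and for
-- a zero coin A's in-place dp[i] += dp[i] doubles whatever partial sum the inner loop
-- has so far, an order-dependent artefact of A's update, while B's natural recursion
-- does not terminate there (RecursionError).
def Pre_coin_change_count_ways_permutations (coins : List Int) (amount : Int) : Prop :=
  0 ≤ amount ∧ (amount = 0 ∨ ∀ c ∈ coins, 1 ≤ c)
instance (coins : List Int) (amount : Int) : Decidable (Pre_coin_change_count_ways_permutations coins amount) := by unfold Pre_coin_change_count_ways_permutations; infer_instance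
def pvWitness_coin_change_count_ways_permutations : List Int × Int := ([1, 2], 4)

def Spec_coin_change_count_ways_permutations (coins : List Int) (amount : Int) (out : Int) : Prop := out = coin_change_count_ways_permutations_alt coins amount
instance (coins : List Int) (amount : Int) (out : Int) : Decidable (Spec_coin_change_count_ways_permutations coins amount out) := by unfold Spec_coin_change_count_ways_permutations; infer_instance

-- ===== CLAIM (what is proved, stated in full; the proofs are below) =====
def Claim_equal_coin_change_count_ways_permutations : Prop := ∀ (coins : List Int) (amount : Int), Dom_coin_change_count_ways_permutations coins amount → Pre_coin_change_count_ways_permutations coins amount → Spec_coin_change_count_ways_permutations coins amount (coin_change_count_ways_permutations coins amount)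

-- ===== LEMMAS AND PROOFS =====

-- The common recurrence W(0)=1, W(j)=Σ_{c∈coins, 1≤c≤j} W(j-c), realised with fuel.
def ccWF (coins : List Int) : Nat → Nat → Int
  | 0, j => if j = 0 then 1 else 0
  | f+1, j =>
    if j = 0 then 1 else
      coins.foldl (fun a c => if 1 ≤ c ∧ c ≤ (j : Int) then a + ccWF coins f (j - c.toNat) else a) 0

def ccW (coins : List Int) (j : Nat) : Int := ccWF coins j j

-- pyGetD / pySetD at a nonnegative Int index are getD / set at the toNat index.
theorem pv_gD (xs : List Int) (i : Int) (h : 0 ≤ i) (d : Int) :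
    PySem.List.pyGetD xs i d = xs.getD i.toNat d := by
  have e : i = ((i.toNat : Nat) : Int) := (Int.toNat_of_nonneg h).symm
  conv_lhs => rw [e]
  rw [PySem.List.pyGetD_natCast]

theorem pv_getD_set_self (l : List Int) (k : Nat) (v d : Int) (h : k < l.length) :
    (l.set k v).getD k d = v := by
  rw [List.getD_eq_getElem?_getD, List.getElem?_set_self h]
  rfl

theorem pv_getD_set_ne (l : List Int) (k j : Nat) (v d : Int) (h : k ≠ j) :
    (l.set k v).getD j d = l.getD j d := by
  rw [List.getD_eq_getElem?_getD, List.getElem?_set_ne h, ← List.getD_eq_getElem?_getD]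

theorem pv_set_getD_self (l : List Int) (k : Nat) (d : Int) (h : k < l.length) :
    l.set k (l.getD k d) = l := by
  rw [List.getD_eq_getElem?_getD, List.getElem?_eq_getElem h]
  simp

theorem pv_getD_replicate (n j : Nat) : (List.replicate n (0 : Int)).getD j 0 = 0 := by
  rw [List.getD_eq_getElem?_getD, List.getElem?_replicate]
  split <;> rfl

-- a conditional-accumulate fold is its start plus a map-sum
theorem pv_foldl_if_sum (l : List Int) (p : Int → Prop) [DecidablePred p] (g : Int → Int)
    (a0 : Int) :
    l.foldl (fun a c => if p c then a + g c else a) a0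
      = a0 + (l.map (fun c => if p c then g c else 0)).sum := by
  induction l generalizing a0 with
  | nil => simp
  | cons c t ih =>
    simp only [List.foldl_cons, List.map_cons, List.sum_cons, ih]
    by_cases h : p c
    · simp only [h, if_pos]
      ring
    · simp only [h, if_neg, not_false_iff]
      ring

theorem ccWF_fuel (coins : List Int) :
    ∀ f1, ∀ j f2, j ≤ f1 → j ≤ f2 → ccWF coins f1 j = ccWF coins f2 j := by
  intro f1
  induction f1 with
  | zero =>
    intro j f2 h1 _
    interval_cases j
    cases f2 <;> simp [ccWF]
  | succ f ih =>
    intro j f2 h1 h2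
    by_cases hj : j = 0
    · subst hj; cases f2 <;> simp [ccWF]
    · obtain ⟨f2', rfl⟩ : ∃ f2', f2 = f2' + 1 := ⟨f2 - 1, by omega⟩
      simp only [ccWF, hj]
      rw [pv_foldl_if_sum, pv_foldl_if_sum]
      simp only [zero_add]
      refine congrArg List.sum (List.map_congr_left ?_)
      intro c _
      by_cases hc : 1 ≤ c ∧ c ≤ (j : Int)
      · rw [if_pos hc, if_pos hc]
        exact ih (j - c.toNat) f2' (by omega) (by omega)
      · rw [if_neg hc, if_neg hc]

theorem ccW_zero (coins : List Int) : ccW coins 0 = 1 := by simp [ccW, ccWF]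

theorem ccW_succ (coins : List Int) (j : Nat) :
    ccW coins (j + 1)
      = (coins.map (fun c =>
          if 1 ≤ c ∧ c ≤ ((j : Int) + 1) then ccW coins (j + 1 - c.toNat) else 0)).sum := by
  have e : ((j + 1 : Nat) : Int) = (j : Int) + 1 := by push_cast; ring
  show ccWF coins (j + 1) (j + 1) = _
  simp only [ccWF, Nat.succ_ne_zero, if_false]
  rw [pv_foldl_if_sum, zero_add]
  refine congrArg List.sum (List.map_congr_left ?_)
  intro c _
  rw [e]
  by_cases hc : 1 ≤ c ∧ c ≤ ((j : Int) + 1)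
  · simp only [hc, if_pos]
    exact ccWF_fuel coins j (j + 1 - c.toNat) (j + 1 - c.toNat) (by omega) (by omega)
  · simp [hc]

-- ---------- A-side ----------

theorem pv_innerA (i : Int) (hi : 1 ≤ i) :
    ∀ (cs : List Int), (∀ c ∈ cs, 1 ≤ c) → ∀ (dp : List Int), i.toNat < dp.length →
    cs.foldl
      (fun dp c =>
        if c ≤ i then
          PySem.List.pySetD dp i (PySem.List.pyGetD dp i 0 + PySem.List.pyGetD dp (i - c) 0)
        else dp) dp
      = dp.set i.toNat (dp.getD i.toNat 0
          + (cs.map (fun c => if c ≤ i then dp.getD (i - c).toNat 0 else 0)).sum) := by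
  intro cs
  induction cs with
  | nil =>
    intro _ dp hlen
    simp only [List.foldl_nil, List.map_nil, List.sum_nil, add_zero]
    exact (pv_set_getD_self dp i.toNat 0 hlen).symm
  | cons c t ih =>
    intro hcs dp hlen
    have hc1 : (1 : Int) ≤ c := hcs c (List.mem_cons_self)
    have ht : ∀ c ∈ t, (1 : Int) ≤ c := fun x hx => hcs x (List.mem_cons_of_mem _ hx)
    by_cases hci : c ≤ i
    · have h0i : (0 : Int) ≤ i := by omega
      have h0ic : (0 : Int) ≤ i - c := by omega
      have hset : PySem.List.pySetD dp i
            (PySem.List.pyGetD dp i 0 + PySem.List.pyGetD dp (i - c) 0)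
          = dp.set i.toNat (dp.getD i.toNat 0 + dp.getD (i - c).toNat 0) := by
        rw [PySem.List.pySetD_of_nonneg _ _ h0i, pv_gD _ _ h0i, pv_gD _ _ h0ic]
      have hlen' : i.toNat < (dp.set i.toNat (dp.getD i.toNat 0 + dp.getD (i - c).toNat 0)).length := by
        simpa using hlen
      simp only [List.foldl_cons, hci, if_pos, hset]
      rw [ih ht _ hlen']
      rw [List.set_set]
      congr 1
      rw [pv_getD_set_self _ _ _ _ hlen]
      have hsum : (t.map (fun c' => if c' ≤ i then
            (dp.set i.toNat (dp.getD i.toNat 0 + dp.getD (i - c).toNat 0)).getD (i - c').toNat 0 else 0)).sum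
          = (t.map (fun c' => if c' ≤ i then dp.getD (i - c').toNat 0 else 0)).sum := by
        refine congrArg List.sum (List.map_congr_left ?_)
        intro c' hc'
        have h1 : (1 : Int) ≤ c' := ht c' hc'
        by_cases hcc : c' ≤ i
        · simp only [hcc, if_pos]
          rw [pv_getD_set_ne _ _ _ _ _ (by omega)]
        · simp [hcc]
      rw [hsum]
      simp only [List.map_cons, List.sum_cons, hci, if_pos]
      ring
    · simp only [List.foldl_cons, hci, if_neg, not_false_iff]
      rw [ih ht dp hlen]
      simp [hci]

theorem pv_outerA (coins : List Int) (hc : ∀ c ∈ coins, 1 ≤ c) (n : Nat) :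
    ∀ m, m ≤ n →
      (let dpm := (PySem.List.pyRange 1 ((m : Int) + 1) 1).foldl
        (fun dp i => coins.foldl
          (fun dp coin =>
            if coin ≤ i then
              PySem.List.pySetD dp i (PySem.List.pyGetD dp i 0 + PySem.List.pyGetD dp (i - coin) 0)
            else dp) dp) ((List.replicate (n + 1) (0 : Int)).set 0 1)
      dpm.length = n + 1 ∧ ∀ j, j ≤ n → dpm.getD j 0 = if j ≤ m then ccW coins j else 0) := by
  intro m
  induction m with
  | zero =>
    intro _
    have hr : PySem.List.pyRange 1 (((0 : Nat) : Int) + 1) 1 = [] := by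
      apply PySem.List.pyRange_one_eq_nil; norm_num
    simp only [hr, List.foldl_nil]
    constructor
    · simp
    · intro j hj
      by_cases hj0 : j = 0
      · subst hj0
        rw [pv_getD_set_self _ _ _ _ (by simp)]
        simp [ccW_zero]
      · rw [pv_getD_set_ne _ _ _ _ _ (by omega), pv_getD_replicate]
        rw [if_neg (by omega)]
  | succ m ih =>
    intro hm
    obtain ⟨hlen, hinv⟩ := ih (by omega)
    have hsplit : PySem.List.pyRange 1 (((m + 1 : Nat) : Int) + 1) 1
        = PySem.List.pyRange 1 ((m : Int) + 1) 1 ++ [(m : Int) + 1] := by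
      have e : (((m + 1 : Nat) : Int) + 1) = ((m : Int) + 1) + 1 := by push_cast; ring
      rw [e]
      exact PySem.List.pyRange_one_succ_right (by omega)
    rw [hsplit, List.foldl_append]
    set dpm := (PySem.List.pyRange 1 ((m : Int) + 1) 1).foldl
        (fun dp i => coins.foldl
          (fun dp coin =>
            if coin ≤ i then
              PySem.List.pySetD dp i (PySem.List.pyGetD dp i 0 + PySem.List.pyGetD dp (i - coin) 0)
            else dp) dp) ((List.replicate (n + 1) (0 : Int)).set 0 1) with hdpm
    simp only [List.foldl_cons, List.foldl_nil]
    have hi1 : (1 : Int) ≤ (m : Int) + 1 := by omega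
    have htn : ((m : Int) + 1).toNat = m + 1 := by omega
    have hlt : ((m : Int) + 1).toNat < dpm.length := by omega
    rw [pv_innerA ((m : Int) + 1) hi1 coins hc dpm hlt]
    have hold : dpm.getD ((m : Int) + 1).toNat 0 = 0 := by
      rw [htn, hinv (m + 1) (by omega)]
      simp
    have hsum : (coins.map (fun c => if c ≤ (m : Int) + 1 then dpm.getD ((m : Int) + 1 - c).toNat 0 else 0)).sum
        = ccW coins (m + 1) := by
      rw [ccW_succ]
      refine congrArg List.sum (List.map_congr_left ?_)
      intro c hcm
      have h1 : (1 : Int) ≤ c := hc c hcm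
      by_cases h2 : c ≤ (m : Int) + 1
      · have e1 : ((m : Int) + 1 - c).toNat = m + 1 - c.toNat := by omega
        rw [if_pos h2, if_pos (⟨h1, h2⟩ : 1 ≤ c ∧ c ≤ (m : Int) + 1)]
        rw [e1, hinv (m + 1 - c.toNat) (by omega)]
        rw [if_pos (by omega : m + 1 - c.toNat ≤ m)]
      · rw [if_neg h2, if_neg (by tauto : ¬ (1 ≤ c ∧ c ≤ (m : Int) + 1))]
    rw [hold, hsum]
    constructor
    · simp [hlen]
    · intro j hj
      by_cases hje : j = m + 1
      · subst hje
        rw [htn, pv_getD_set_self _ _ _ _ (by omega)]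
        simp
      · rw [htn, pv_getD_set_ne _ _ _ _ _ (by omega)]
        rw [hinv j hj]
        by_cases hjm : j ≤ m
        · rw [if_pos hjm, if_pos (by omega)]
        · rw [if_neg hjm, if_neg (by omega)]

theorem pv_A_eq (coins : List Int) (amount : Int) (hc : ∀ c ∈ coins, 1 ≤ c) (ha : 0 ≤ amount) :
    coin_change_count_ways_permutations coins amount = ccW coins amount.toNat := by
  obtain ⟨n, rfl⟩ : ∃ n : Nat, amount = (n : Int) := ⟨amount.toNat, by omega⟩
  unfold coin_change_count_ways_permutations
  have h0 : PySem.List.pySetD (List.replicate ((n : Int) + 1).toNat (0 : Int)) 0 1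
      = (List.replicate (n + 1) (0 : Int)).set 0 1 := by
    rw [PySem.List.pySetD_of_nonneg _ _ (by omega)]
    have e : ((n : Int) + 1).toNat = n + 1 := by omega
    rw [e]
    rfl
  simp only [h0]
  obtain ⟨hlen, hinv⟩ := pv_outerA coins hc n n le_rfl
  rw [pv_gD _ _ (by omega)]
  have hr := hinv n le_rfl
  rw [if_pos le_rfl] at hr
  have htn : ((n : Int)).toNat = n := by omega
  rw [htn, hr]

-- ---------- B-side ----------

-- memo invariant: every cached entry is a correct value of the recurrence
def MemOK (coins : List Int) (m : PySem.Dict Int Int) : Prop :=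
  ∀ j v, m.get? j = some v → 0 ≤ j ∧ v = ccW coins j.toNat

theorem pv_memOK_empty (coins : List Int) : MemOK coins PySem.Dict.empty := by
  intro j v h
  rw [PySem.Dict.get?_empty] at h
  exact absurd h (by simp)

theorem pv_ccWays_correct (coins : List Int) (hc : ∀ c ∈ coins, 1 ≤ c) :
    ∀ f i m, 0 ≤ i → i.toNat < f → MemOK coins m →
      (ccWays coins f i m).1 = ccW coins i.toNat ∧ MemOK coins (ccWays coins f i m).2 := by
  intro f
  induction f with
  | zero => intro i m _ h _; omega
  | succ f ih =>
    intro i m hi hf hm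
    by_cases hi0 : i = 0
    · subst hi0
      simp [ccWays, ccW_zero, hm]
    · have hi1 : (1 : Int) ≤ i := by omega
      rcases hget : PySem.Dict.get? m i with _ | v
      · -- cache miss: the fold over the coins
        have hfold : ∀ (cs : List Int), (∀ c ∈ cs, 1 ≤ c) → ∀ (t : Int) (m' : PySem.Dict Int Int),
            MemOK coins m' →
            (cs.foldl
              (fun p c =>
                if c ≤ i then
                  let q := ccWays coins f (i - c) p.2
                  (p.1 + q.1, q.2)
                else p) (t, m')).1
              = t + (cs.map (fun c => if c ≤ i then ccW coins (i - c).toNat else 0)).sum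
            ∧ MemOK coins (cs.foldl
              (fun p c =>
                if c ≤ i then
                  let q := ccWays coins f (i - c) p.2
                  (p.1 + q.1, q.2)
                else p) (t, m')).2 := by
          intro cs
          induction cs with
          | nil => intro _ t m' hm'; simpa using hm'
          | cons c tl ihc =>
            intro hcs t m' hm'
            have hc1 : (1 : Int) ≤ c := hcs c (List.mem_cons_self)
            have htl : ∀ c ∈ tl, (1 : Int) ≤ c := fun x hx => hcs x (List.mem_cons_of_mem _ hx)
            by_cases hci : c ≤ i
            · have h0 : (0 : Int) ≤ i - c := by omega
              have hlt : (i - c).toNat < f := by omega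
              obtain ⟨hv, hm2⟩ := ih (i - c) m' h0 hlt hm'
              simp only [List.foldl_cons, hci, if_pos]
              obtain ⟨h1, h2⟩ := ihc htl (t + (ccWays coins f (i - c) m').1)
                ((ccWays coins f (i - c) m').2) hm2
              refine ⟨?_, h2⟩
              rw [h1, hv]
              rw [List.map_cons, List.sum_cons, if_pos hci]
              ring
            · simp only [List.foldl_cons, hci, if_neg, not_false_iff]
              obtain ⟨h1, h2⟩ := ihc htl t m' hm'
              refine ⟨?_, h2⟩
              rw [h1]
              simp [hci]
        obtain ⟨h1, h2⟩ := hfold coins hc 0 m hm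
        have hsum : (coins.map (fun c => if c ≤ i then ccW coins (i - c).toNat else 0)).sum
            = ccW coins i.toNat := by
          obtain ⟨j, hj⟩ : ∃ j : Nat, i.toNat = j + 1 := ⟨i.toNat - 1, by omega⟩
          rw [hj, ccW_succ]
          refine congrArg List.sum (List.map_congr_left ?_)
          intro c hcm
          have h1c : (1 : Int) ≤ c := hc c hcm
          by_cases hci : c ≤ i
          · have hcond : 1 ≤ c ∧ c ≤ (j : Int) + 1 := ⟨h1c, by omega⟩
            rw [if_pos hci, if_pos hcond]
            congr 1
            omega
          · rw [if_neg hci, if_neg (by rintro ⟨_, h⟩; omega)]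
        constructor
        · simp only [ccWays, hi0, if_neg, not_false_iff, hget]
          rw [h1, hsum]
          ring
        · simp only [ccWays, hi0, if_neg, not_false_iff, hget]
          intro j v hjv
          rw [PySem.Dict.get?_insert] at hjv
          by_cases hji : j = i
          · subst hji
            rw [if_pos rfl] at hjv
            refine ⟨hi, ?_⟩
            have := Option.some.inj hjv
            rw [← this, h1, hsum]
            ring
          · rw [if_neg hji] at hjv
            exact h2 j v hjv
      · -- cache hit
        obtain ⟨_, hv⟩ := hm i v hget
        constructor
        · simp only [ccWays, hi0, if_neg, not_false_iff, hget]
          exact hv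
        · simp only [ccWays, hi0, if_neg, not_false_iff, hget]
          exact hm

theorem pv_B_eq (coins : List Int) (amount : Int) (hc : ∀ c ∈ coins, 1 ≤ c) (ha : 0 ≤ amount) :
    coin_change_count_ways_permutations_alt coins amount = ccW coins amount.toNat := by
  unfold coin_change_count_ways_permutations_alt
  exact (pv_ccWays_correct coins hc (amount.natAbs + 1) amount PySem.Dict.empty ha
    (by omega) (pv_memOK_empty coins)).1

theorem pv_amount_zero (coins : List Int) :
    coin_change_count_ways_permutations coins 0 = 1
      ∧ coin_change_count_ways_permutations_alt coins 0 = 1 := by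
  unfold coin_change_count_ways_permutations coin_change_count_ways_permutations_alt
  have hr1 : PySem.List.pyRange 1 ((0 : Int) + 1) 1 = [] := PySem.List.pyRange_one_eq_nil (by norm_num)
  simp only [hr1, List.foldl_nil]
  constructor
  · decide
  · simp [ccWays]

-- ===== VERDICT (by name: the statement is the Claim_ definition above) =====
theorem coin_change_count_ways_permutations_spec : Claim_equal_coin_change_count_ways_permutations := by
  intro coins amount _ hpre
  obtain ⟨ha, hor⟩ := hpre
  unfold Spec_coin_change_count_ways_permutations
  rcases hor with h0 | hc
  · subst h0
    rw [(pv_amount_zero coins).1, (pv_amount_zero coins).2]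
  · rw [pv_A_eq coins amount hc ha, pv_B_eq coins amount hc ha]
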